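-- pv_equiv track=rewrite | github.com/pierrehillebrand/Moulinette-minishell | Minishell.py | removePrompt
-- ===== SOURCE A (Python) =====
-- def removePrompt(output):
-- 	res = ""
-- 	lines = output.split("@MINISHELL@>")
-- 	res = lines[0]
-- 	del lines[0]
-- 	for line in lines:
-- 		temp = line.split("\n",1)
-- 		if len(temp) > 1:
-- 			res += temp[1]
-- 		else:
-- 			res += temp[0]
-- 	return res
-- ===== SOURCE B (Python) =====
-- _MARK = "@MINISHELL@>"
--
-- def removePrompt(output):
--     # one left-to-right scan: outside a prompt span copy chars; after a marker,
--     # buffer chars until a newline (discard buffer + newline) or a new marker /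
--     # end of string (the buffer is kept, as only marker-to-newline text is prompt echo)
--     res = []
--     buf = []
--     skipping = False
--     i = 0
--     n = len(output)
--     while i < n:
--         if output.startswith(_MARK, i):
--             if skipping:
--                 res += buf
--             buf = []
--             skipping = True
--             i += len(_MARK)
--         elif skipping:
--             c = output[i]
--             i += 1
--             if c == "\n":
--                 buf = []
--                 skipping = False
--             else:
--                 buf.append(c)
--         else:
--             res.append(output[i])
--             i += 1
--     if skipping:
--         res += buf
--     return "".join(res)
-- ===== Notes on version B (the rewrite author's own statement) =====
-- stated objective: alternative
-- what changed: A materialises intermediate lists by splitting on the marker and re-splitting every segment on the first newline; B makes one left-to-right scan over the characters with a skipping flag and a small buffer, never building segment lists.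
import Mathlib
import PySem

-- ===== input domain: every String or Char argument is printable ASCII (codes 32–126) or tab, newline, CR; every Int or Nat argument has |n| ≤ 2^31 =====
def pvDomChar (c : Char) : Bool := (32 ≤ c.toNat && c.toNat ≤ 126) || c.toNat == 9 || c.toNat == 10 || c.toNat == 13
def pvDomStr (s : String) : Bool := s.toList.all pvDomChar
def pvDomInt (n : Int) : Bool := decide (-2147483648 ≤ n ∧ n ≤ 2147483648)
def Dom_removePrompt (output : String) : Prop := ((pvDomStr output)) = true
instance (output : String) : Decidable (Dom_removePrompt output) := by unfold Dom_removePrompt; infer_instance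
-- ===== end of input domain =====

-- B replaces A's split-on-marker + per-segment split-on-newline with a single
-- left-to-right scan carrying a small buffer (objective: alternative decomposition, same cost).

def pvMark : List Char := "@MINISHELL@>".toList

-- ===== PORT A =====
def removePrompt (output : String) : String :=
  let lines := PySem.Chars.splitOn output.toList pvMark
  match lines with
  | [] => ""   -- unreachable: Python split never returns an empty list
  | l0 :: rest =>
    String.ofList (rest.foldl (fun res line =>
      match PySem.Chars.splitOnMax line ['\n'] 1 with
      | _ :: t1 :: _ => res ++ t1      -- len(temp) > 1: res += temp[1]
      | [t0] => res ++ t0              -- else: res += temp[0]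
      | [] => res) l0)                 -- unreachable

-- ===== PORT B =====
-- while i < n of Source B as structural recursion on the remaining characters; the
-- [] case is loop exit (startswith of the nonempty marker can never hold there)
def pvScanB : List Char → List Char → List Char → Bool → List Char
  | [], res, buf, skipping => if skipping then res ++ buf else res
  | c :: rest, res, buf, skipping =>
    if pvMark.isPrefixOf (c :: rest) then
      pvScanB ((c :: rest).drop pvMark.length) (if skipping then res ++ buf else res) [] true
    else if skipping then
      if c = '\n' then pvScanB rest res [] false
      else pvScanB rest res (buf ++ [c]) true
    else pvScanB rest (res ++ [c]) buf skipping
termination_by s _ _ _ => s.length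
decreasing_by
  · have h12 : pvMark.length = 12 := by decide
    rw [List.length_drop, h12]
    simp
  all_goals simp

def removePrompt_alt (output : String) : String :=
  String.ofList (pvScanB output.toList [] [] false)

-- ===== PRECONDITION & SPEC =====
def Spec_removePrompt (output : String) (out : String) : Prop := out = removePrompt_alt output
instance (output : String) (out : String) : Decidable (Spec_removePrompt output out) := by unfold Spec_removePrompt; infer_instance

-- ===== CLAIM (what is proved, stated in full; the proofs are below) =====
def Claim_equal_removePrompt : Prop := ∀ (output : String), Dom_removePrompt output → Spec_removePrompt output (removePrompt output)

-- ===== LEMMAS AND PROOFS =====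

-- the segments Python's output.split("@MINISHELL@>") produces, as a structural recursion
def pvSplitP : List Char → List (List Char)
  | [] => [[]]
  | c :: rest =>
    if pvMark.isPrefixOf (c :: rest) then [] :: pvSplitP ((c :: rest).drop pvMark.length)
    else
      match pvSplitP rest with
      | [] => [[c]]
      | s0 :: ss => (c :: s0) :: ss
termination_by l => l.length
decreasing_by
  · have h12 : pvMark.length = 12 := by decide
    rw [List.length_drop, h12]
    simp
  · simp

-- what A does to one post-marker segment: drop through the first newline, else keep it all
def pvDropLine (x : List Char) : List Char :=
  if '\n' ∈ x then (x.dropWhile (· ≠ '\n')).tail else x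

lemma pvSplitP_ne_nil (l : List Char) : pvSplitP l ≠ [] := by
  cases l with
  | nil => rw [pvSplitP]; simp
  | cons c rest =>
    rw [pvSplitP]
    split
    · simp
    · split <;> simp

lemma pvSplitOn_go_eq (fuel : Nat) : ∀ (l cur : List Char) (accs : List (List Char)) (s0 : List Char) (ss : List (List Char)),
    l.length < fuel → pvSplitP l = s0 :: ss →
    PySem.Chars.splitOn.go pvMark fuel l cur accs =
      accs.reverse ++ (cur.reverse ++ s0) :: ss := by
  induction fuel with
  | zero => intro l cur accs s0 ss h hs; omega
  | succ fuel ih =>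
    intro l cur accs s0 ss h hs
    cases l with
    | nil =>
      rw [PySem.Chars.splitOn.go]
      · rw [pvSplitP] at hs
        injection hs with h1 h2
        subst h1; subst h2
        simp
      · omega
    | cons c rest =>
      rw [PySem.Chars.splitOn.go]
      rw [pvSplitP] at hs
      by_cases hp : pvMark.isPrefixOf (c :: rest)
      · rw [if_pos hp]
        rw [if_pos hp] at hs
        obtain ⟨s0', ss', hrec⟩ : ∃ a b, pvSplitP ((c :: rest).drop pvMark.length) = a :: b := by
          rcases he : pvSplitP ((c :: rest).drop pvMark.length) with _ | ⟨a, b⟩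
          · exact absurd he (pvSplitP_ne_nil _)
          · exact ⟨a, b, rfl⟩
        rw [hrec] at hs
        injection hs with h1 h2
        subst h1; subst h2
        rw [ih _ [] (cur.reverse :: accs) s0' ss'
          (by have h12 : pvMark.length = 12 := by decide
              rw [List.length_drop, h12]; simp at h ⊢; omega) hrec]
        simp
      · rw [if_neg hp]
        rw [if_neg hp] at hs
        rcases he : pvSplitP rest with _ | ⟨a, b⟩
        · exact absurd he (pvSplitP_ne_nil _)
        · rw [he] at hs
          injection hs with h1 h2
          subst h1; subst h2
          rw [ih rest (c :: cur) accs a b (by simp at h ⊢; omega) he]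
          simp

lemma pvSplitOn_eq (l : List Char) : PySem.Chars.splitOn l pvMark = pvSplitP l := by
  rcases he : pvSplitP l with _ | ⟨a, b⟩
  · exact absurd he (pvSplitP_ne_nil _)
  · unfold PySem.Chars.splitOn
    rw [pvSplitOn_go_eq (l.length + 1) l [] [] a b (by omega) he]
    simp

lemma pvSplitOnMax_go_zero (fuel : Nat) (l cur : List Char) (accs : List (List Char)) :
    PySem.Chars.splitOnMax.go ['\n'] fuel 0 l cur accs = accs.reverse ++ [cur.reverse ++ l] := by
  cases fuel with
  | zero => rw [PySem.Chars.splitOnMax.go]; simp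
  | succ fuel =>
    cases l with
    | nil =>
      rw [PySem.Chars.splitOnMax.go]
      · simp
      · omega
    | cons c rest =>
      rw [PySem.Chars.splitOnMax.go]
      simp

lemma pvSplitOnMax_go_one (fuel : Nat) : ∀ (l cur : List Char) (accs : List (List Char)),
    l.length < fuel →
    PySem.Chars.splitOnMax.go ['\n'] fuel 1 l cur accs =
      if '\n' ∈ l then
        accs.reverse ++ [cur.reverse ++ l.takeWhile (· ≠ '\n'), (l.dropWhile (· ≠ '\n')).tail]
      else accs.reverse ++ [cur.reverse ++ l] := by
  induction fuel with
  | zero => intro l cur accs h; omega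
  | succ fuel ih =>
    intro l cur accs h
    cases l with
    | nil =>
      rw [PySem.Chars.splitOnMax.go]
      · simp
      · omega
    | cons c rest =>
      rw [PySem.Chars.splitOnMax.go]
      by_cases hc : c = '\n'
      · subst hc
        rw [if_neg (by omega), if_pos (by simp [List.isPrefixOf])]
        rw [pvSplitOnMax_go_zero]
        simp [List.takeWhile, List.dropWhile]
      · rw [if_neg (by omega), if_neg (by simp [List.isPrefixOf]; exact fun he => hc he.symm)]
        rw [ih rest (c :: cur) accs (by simp at h ⊢; omega)]
        by_cases hn : '\n' ∈ rest
        · rw [if_pos hn, if_pos (by simp [hn])]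
          simp [List.takeWhile, List.dropWhile, hc]
        · rw [if_neg hn, if_neg (by simp [hn]; exact fun he => hc he.symm)]
          simp

lemma pvBody_eq (line : List Char) :
    (match PySem.Chars.splitOnMax line ['\n'] 1 with
      | _ :: t1 :: _ => t1
      | [t0] => t0
      | [] => ([] : List Char)) = pvDropLine line := by
  unfold PySem.Chars.splitOnMax
  rw [if_neg (by omega)]
  rw [show Int.toNat 1 = 1 from rfl]
  rw [pvSplitOnMax_go_one (line.length + 1) line [] [] (by omega)]
  unfold pvDropLine
  by_cases hn : '\n' ∈ line
  · rw [if_pos hn, if_pos hn]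
    simp
  · rw [if_neg hn, if_neg hn]
    simp

lemma pvDropLine_no_nl {buf : List Char} (h : '\n' ∉ buf) : pvDropLine buf = buf := by
  unfold pvDropLine
  rw [if_neg h]

lemma pvDropLine_nl {buf : List Char} (s0 : List Char) (h : '\n' ∉ buf) :
    pvDropLine (buf ++ '\n' :: s0) = s0 := by
  unfold pvDropLine
  rw [if_pos (by simp)]
  rw [List.dropWhile_append]
  have h1 : List.dropWhile (fun x => decide (x ≠ '\n')) buf = [] := by
    rw [List.dropWhile_eq_nil_iff]
    intro x hx
    simp
    exact fun he => h (he ▸ hx)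
  rw [h1]
  simp [List.dropWhile]

lemma pvScan_eq (n : Nat) : ∀ (l res buf : List Char) (skipping : Bool)
    (s0 : List Char) (ss : List (List Char)),
    l.length ≤ n → '\n' ∉ buf → pvSplitP l = s0 :: ss →
    pvScanB l res buf skipping =
      res ++ (if skipping then pvDropLine (buf ++ s0) else s0)
          ++ (ss.map pvDropLine).flatten := by
  induction n with
  | zero =>
    intro l res buf skipping s0 ss hl hb hs
    have : l = [] := List.length_eq_zero_iff.mp (Nat.le_zero.mp hl)
    subst this
    rw [pvSplitP] at hs
    injection hs with h1 h2
    subst h1; subst h2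
    rw [pvScanB]
    cases skipping with
    | false => simp
    | true => simp [pvDropLine_no_nl hb]
  | succ n ih =>
    intro l res buf skipping s0 ss hl hb hs
    cases l with
    | nil =>
      rw [pvSplitP] at hs
      injection hs with h1 h2
      subst h1; subst h2
      rw [pvScanB]
      cases skipping with
      | false => simp
      | true => simp [pvDropLine_no_nl hb]
    | cons c rest =>
      rw [pvScanB, pvSplitP] at *
      by_cases hp : pvMark.isPrefixOf (c :: rest)
      · rw [if_pos hp]
        rw [if_pos hp] at hs
        obtain ⟨a, b, he⟩ : ∃ a b, pvSplitP ((c :: rest).drop pvMark.length) = a :: b := by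
          rcases he : pvSplitP ((c :: rest).drop pvMark.length) with _ | ⟨a, b⟩
          · exact absurd he (pvSplitP_ne_nil _)
          · exact ⟨a, b, rfl⟩
        rw [he] at hs
        injection hs with h1 h2
        subst h1; subst h2
        rw [ih _ _ [] true a b
          (by have h12 : pvMark.length = 12 := by decide
              rw [List.length_drop, h12]; simp at hl ⊢; omega)
          (by simp) he]
        cases skipping with
        | false => simp
        | true => simp [pvDropLine_no_nl hb]
      · rw [if_neg hp]
        rw [if_neg hp] at hs
        obtain ⟨a, b, he⟩ : ∃ a b, pvSplitP rest = a :: b := by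
          rcases he : pvSplitP rest with _ | ⟨a, b⟩
          · exact absurd he (pvSplitP_ne_nil _)
          · exact ⟨a, b, rfl⟩
        rw [he] at hs
        injection hs with h1 h2
        subst h1; subst h2
        have hrl : rest.length ≤ n := by simp at hl; omega
        cases skipping with
        | false =>
          rw [ih rest _ buf false a b hrl hb he]
          simp
        | true =>
          by_cases hc : c = '\n'
          · subst hc
            rw [if_pos rfl]
            rw [ih rest res [] false a b hrl (by simp) he]
            rw [pvDropLine_nl a hb]
            simp
          · rw [if_neg hc]
            rw [ih rest res (buf ++ [c]) true a b hrl
              (by simp; exact ⟨hb, fun he' => hc he'.symm⟩) he]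
            simp

lemma pvBody_eq' (res line : List Char) :
    (match PySem.Chars.splitOnMax line ['\n'] 1 with
      | _ :: t1 :: _ => res ++ t1
      | [t0] => res ++ t0
      | [] => res) = res ++ pvDropLine line := by
  rw [← pvBody_eq line]
  rcases PySem.Chars.splitOnMax line ['\n'] 1 with _ | ⟨t0, _ | ⟨t1, rest⟩⟩ <;> simp

lemma pvFold_eq (rest : List (List Char)) : ∀ (res : List Char),
    rest.foldl (fun res line =>
      match PySem.Chars.splitOnMax line ['\n'] 1 with
      | _ :: t1 :: _ => res ++ t1
      | [t0] => res ++ t0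
      | [] => res) res = res ++ (rest.map pvDropLine).flatten := by
  induction rest with
  | nil => intro res; simp
  | cons line rest ih =>
    intro res
    rw [List.foldl_cons, pvBody_eq', ih]
    simp

-- ===== VERDICT (by name: the statement is the Claim_ definition above) =====
theorem removePrompt_spec : Claim_equal_removePrompt := by
  intro output _
  unfold Spec_removePrompt removePrompt removePrompt_alt
  rcases he : pvSplitP output.toList with _ | ⟨s0, ss⟩
  · exact absurd he (pvSplitP_ne_nil _)
  · simp only [pvSplitOn_eq, he]
    rw [pvFold_eq, pvScan_eq output.toList.length output.toList [] [] false s0 ss le_rfl (by simp) he]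
    simp
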